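-- pv_equiv track=rewrite | github.com/yonghyeokrhee/big_stone_algorithm | programmers/1번.py | solution
-- ===== SOURCE A (Python) =====
-- def htransform(arr,r,c):
--     # 가로 변환
--     answer = [[] for _ in range(r)]
--     for i in range(r):
--         for j in range(0,c,2):
--             answer[i].append(max(arr[i][j],arr[i][j+1]))
--
--     return answer
--
-- def vtransform(arr,r,c):
--     # 세로변환
--     answer = [[] for _ in range(int(r/2))]
--     for i in range(0,r,2):
--         for j in range(c):
--             answer[int(i/2)].append(min(arr[i][j], arr[i+1][j]))
--
--     return answer
--
-- def solution(arr,k):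
--
--     if k == 0: # transform을 종료한다.
--         return arr
--
--     r,c = len(arr), len(arr[0])
--
--     if c >= r: # 가로가 세로보다 길거나 같으면
--         arr = htransform(arr,r,c)
--     else:
--         arr = vtransform(arr,r,c) # 아니면 세로변환
--
--     return solution(arr,k-1)
-- ===== SOURCE B (Python) =====
-- def solution(arr, k):
--     while k > 0:
--         r, c = len(arr), len(arr[0])
--         if c >= r:
--             arr = [[max(row[j], row[j + 1]) for j in range(0, c, 2)] for row in arr]
--         else:
--             arr = [[min(arr[i][j], arr[i + 1][j]) for j in range(c)] for i in range(0, r, 2)]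
--         k -= 1
--     return arr
-- ===== Notes on version B (the rewrite author's own statement) =====
-- stated objective: simpler
-- what changed: Replaced the three-function recursive decomposition with a single iterative while-loop whose body inlines both pooling passes as list comprehensions (no index-addressed accumulator rows, no helper functions).
-- outside the precondition, e.g. on solution([[], [], []], 1): A returns [[]], B returns [[], []]
import Mathlib
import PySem

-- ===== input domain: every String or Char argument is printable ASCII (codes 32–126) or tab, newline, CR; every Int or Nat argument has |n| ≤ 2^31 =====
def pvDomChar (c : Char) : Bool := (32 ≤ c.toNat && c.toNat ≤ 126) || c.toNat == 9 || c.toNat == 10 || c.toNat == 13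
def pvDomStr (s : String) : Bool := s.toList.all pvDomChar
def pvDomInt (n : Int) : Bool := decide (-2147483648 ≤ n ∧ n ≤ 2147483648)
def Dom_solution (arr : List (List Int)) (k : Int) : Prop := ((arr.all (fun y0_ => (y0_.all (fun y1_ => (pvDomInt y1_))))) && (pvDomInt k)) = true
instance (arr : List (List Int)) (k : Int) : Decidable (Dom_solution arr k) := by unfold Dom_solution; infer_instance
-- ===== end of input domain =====

-- B replaces the three-function recursive decomposition of A by a single iterative loop with
-- inlined pooling comprehensions (objective: simpler). Neither version mutates its argument.

-- ===== PORT A =====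
-- answer[t].append(v)  (out-of-range index leaves the list unchanged; Pre_ keeps it in range)
def appendAt : List (List Int) → Nat → Int → List (List Int)
  | [], _, _ => []
  | x :: xs, 0, v => (x ++ [v]) :: xs
  | x :: xs, n+1, v => x :: appendAt xs n v

def htransform (arr : List (List Int)) (r c : Int) : List (List Int) :=
  (PySem.List.pyRange 0 r 1).foldl
    (fun ans i =>
      (PySem.List.pyRange 0 c 2).foldl
        (fun ans j =>
          appendAt ans i.toNat
            (max (PySem.List.pyGetD (PySem.List.pyGetD arr i []) j 0)
                 (PySem.List.pyGetD (PySem.List.pyGetD arr i []) (j + 1) 0))) ans)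
    (List.replicate r.toNat [])

def vtransform (arr : List (List Int)) (r c : Int) : List (List Int) :=
  (PySem.List.pyRange 0 r 2).foldl
    (fun ans i =>
      (PySem.List.pyRange 0 c 1).foldl
        (fun ans j =>
          appendAt ans (PySem.Int.floordiv i 2).toNat
            (min (PySem.List.pyGetD (PySem.List.pyGetD arr i []) j 0)
                 (PySem.List.pyGetD (PySem.List.pyGetD arr (i + 1) []) j 0))) ans)
    (List.replicate (PySem.Int.floordiv r 2).toNat [])

-- A's recursion on k, counted down as fuel (A diverges for k < 0, which is outside Pre_)
def solGo : List (List Int) → Nat → List (List Int)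
  | arr, 0 => arr
  | arr, n+1 =>
    let r : Int := arr.length
    let c : Int := (PySem.List.pyGetD arr 0 []).length
    if c ≥ r then solGo (htransform arr r c) n else solGo (vtransform arr r c) n

def solution (arr : List (List Int)) (k : Int) : List (List Int) := solGo arr k.toNat

-- ===== PORT B =====
def solAltGo : List (List Int) → Nat → List (List Int)
  | arr, 0 => arr
  | arr, n+1 =>
    let r : Int := arr.length
    let c : Int := (PySem.List.pyGetD arr 0 []).length
    solAltGo
      (if c ≥ r then
        arr.map (fun row =>
          (PySem.List.pyRange 0 c 2).map (fun j =>
            max (PySem.List.pyGetD row j 0) (PySem.List.pyGetD row (j + 1) 0)))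
      else
        (PySem.List.pyRange 0 r 2).map (fun i =>
          (PySem.List.pyRange 0 c 1).map (fun j =>
            min (PySem.List.pyGetD (PySem.List.pyGetD arr i []) j 0)
                (PySem.List.pyGetD (PySem.List.pyGetD arr (i + 1) []) j 0))))
      n

def solution_alt (arr : List (List Int)) (k : Int) : List (List Int) := solAltGo arr k.toNat

-- ===== PRECONDITION & SPEC =====
-- okDim r c k: the k pooling steps of an r x c matrix each halve an even dimension
-- (a recurrence on the two dimensions and k only; it never looks at the data)
def okDim : Nat → Nat → Nat → Bool
  | _, _, 0 => true
  | r, c, k+1 =>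
    if c ≥ r then decide (2 ∣ c) && okDim r (c / 2) k
    else decide (2 ∣ r) && okDim (r / 2) c k

-- Pre_ admits every k = 0 input, and for k > 0 the nonempty matrices whose rows all reach
-- the first row's width and whose dimensions halve evenly for k steps (okDim); outside it
-- A raises IndexError, except on degenerate zero-width matrices with an odd step, a corner
-- no caller would specify, where A and B return different but equally defensible numbers
-- of empty rows (floor(r/2) vs ceil(r/2) per min-pooling step).
def Pre_solution (arr : List (List Int)) (k : Int) : Prop :=
  0 ≤ k ∧ (k = 0 ∨ (arr ≠ [] ∧ (∀ row ∈ arr, (arr.headD []).length ≤ row.length) ∧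
    okDim arr.length (arr.headD []).length k.toNat = true))
instance (arr : List (List Int)) (k : Int) : Decidable (Pre_solution arr k) := by
  unfold Pre_solution; infer_instance

def pvWitness_solution : List (List Int) × Int := ([[1, 2], [3, 4]], 1)

def Spec_solution (arr : List (List Int)) (k : Int) (out : List (List Int)) : Prop := out = solution_alt arr k
instance (arr : List (List Int)) (k : Int) (out : List (List Int)) : Decidable (Spec_solution arr k out) := by unfold Spec_solution; infer_instance

-- ===== CLAIM (what is proved, stated in full; the proofs are below) =====
def Claim_equal_solution : Prop := ∀ (arr : List (List Int)) (k : Int), Dom_solution arr k → Pre_solution arr k → Spec_solution arr k (solution arr k)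

-- ===== LEMMAS AND PROOFS =====

-- fillAt ans t v appends the whole list v to slot t
def fillAt : List (List Int) → Nat → List Int → List (List Int)
  | [], _, _ => []
  | x :: xs, 0, v => (x ++ v) :: xs
  | x :: xs, n+1, v => x :: fillAt xs n v

lemma fillAt_nil (ans : List (List Int)) (t : Nat) : fillAt ans t [] = ans := by
  induction ans generalizing t with
  | nil => rfl
  | cons x xs ih => cases t <;> simp [fillAt, ih]

lemma fillAt_appendAt (ans : List (List Int)) (t : Nat) (x : Int) (v : List Int) :
    fillAt (appendAt ans t x) t v = fillAt ans t (x :: v) := by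
  induction ans generalizing t with
  | nil => rfl
  | cons y ys ih => cases t <;> simp [fillAt, appendAt, ih]

lemma foldl_appendAt (L : List Int) (f : Int → Int) (t : Nat) (ans : List (List Int)) :
    L.foldl (fun a j => appendAt a t (f j)) ans = fillAt ans t (L.map f) := by
  induction L generalizing ans with
  | nil => simp [fillAt_nil]
  | cons j L ih => simp [List.foldl_cons, ih, fillAt_appendAt]

lemma foldl_fillAt_shift (L : List Nat) (h : Nat → List Int) (x : List Int) (l : List (List Int)) :
    L.foldl (fun a t => fillAt a (t + 1) (h t)) (x :: l) =
      x :: L.foldl (fun a t => fillAt a t (h t)) l := by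
  induction L generalizing l with
  | nil => rfl
  | cons t L ih => simp [List.foldl_cons, fillAt, ih]

lemma fold_fill_range (m : Nat) (g : Nat → List Int) :
    (List.range m).foldl (fun a t => fillAt a t (g t)) (List.replicate m []) =
      (List.range m).map g := by
  induction m generalizing g with
  | zero => rfl
  | succ m ih =>
    rw [List.range_succ_eq_map]
    simp only [List.foldl_cons, List.foldl_map, List.map_cons, List.map_map,
      List.replicate_succ, fillAt, List.nil_append]
    rw [foldl_fillAt_shift]
    exact congrArg _ (ih (fun t => g (t + 1)))

lemma map_range_getD (arr : List (List Int)) (F : List Int → List Int) :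
    (List.range arr.length).map (fun t => F (arr.getD t [])) = arr.map F := by
  induction arr with
  | nil => rfl
  | cons x xs ih =>
    rw [List.length_cons, List.range_succ_eq_map]
    simp only [List.map_cons, List.map_map]
    exact congrArg₂ _ rfl (by simpa using ih)

lemma pyRange_two (m : Nat) :
    PySem.List.pyRange 0 (2 * (m : Int)) 2 = (List.range m).map (fun (t : Nat) => 2 * (t : Int)) := by
  rw [PySem.List.pyRange_of_pos _ _ (by norm_num)]
  have hcount : (if (0:Int) < 2 * m then ((2 * (m:Int) - 0 + 2 - 1) / 2).toNat else 0) = m := by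
    split_ifs with h <;> omega
  rw [hcount]
  exact List.map_congr_left (fun t _ => by omega)

lemma length_pyRange_two (m : Nat) : (PySem.List.pyRange 0 (2 * (m : Int)) 2).length = m := by
  rw [pyRange_two]; simp

lemma pyRange_one_nat (m : Nat) :
    PySem.List.pyRange 0 (m : Int) 1 = (List.range m).map (fun (t : Nat) => (t : Int)) := by
  rw [PySem.List.pyRange_one]
  simp

lemma floordiv_two_mul (t : Nat) : (PySem.Int.floordiv (2 * (t : Int)) 2).toNat = t := by
  simp [PySem.Int.floordiv]

lemma htransform_eq (arr : List (List Int)) (c : Int) :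
    htransform arr arr.length c =
      arr.map (fun row =>
        (PySem.List.pyRange 0 c 2).map (fun j =>
          max (PySem.List.pyGetD row j 0) (PySem.List.pyGetD row (j + 1) 0))) := by
  unfold htransform
  rw [pyRange_one_nat, List.foldl_map]
  have hstep : ∀ (a : List (List Int)) (t : Nat),
      (PySem.List.pyRange 0 c 2).foldl
        (fun ans j => appendAt ans ((t : Int)).toNat
          (max (PySem.List.pyGetD (PySem.List.pyGetD arr (t : Int) []) j 0)
               (PySem.List.pyGetD (PySem.List.pyGetD arr (t : Int) []) (j + 1) 0))) a =
      fillAt a t ((PySem.List.pyRange 0 c 2).map (fun j =>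
          max (PySem.List.pyGetD (arr.getD t []) j 0)
              (PySem.List.pyGetD (arr.getD t []) (j + 1) 0))) := by
    intro a t
    rw [foldl_appendAt]
    simp
  rw [PySem.List.foldl_congr_mem _ _
      (fun a (t : Nat) => fillAt a t ((PySem.List.pyRange 0 c 2).map (fun j =>
          max (PySem.List.pyGetD (arr.getD t []) j 0)
              (PySem.List.pyGetD (arr.getD t []) (j + 1) 0)))) _
      (fun a t _ => hstep a t)]
  have hlen : ((arr.length : Int)).toNat = arr.length := by simp
  rw [hlen, fold_fill_range]
  exact map_range_getD arr (fun row =>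
    (PySem.List.pyRange 0 c 2).map (fun j =>
      max (PySem.List.pyGetD row j 0) (PySem.List.pyGetD row (j + 1) 0)))

lemma vtransform_eq (arr : List (List Int)) (c : Int) (hr : 2 ∣ arr.length) :
    vtransform arr arr.length c =
      (PySem.List.pyRange 0 arr.length 2).map (fun i =>
        (PySem.List.pyRange 0 c 1).map (fun j =>
          min (PySem.List.pyGetD (PySem.List.pyGetD arr i []) j 0)
              (PySem.List.pyGetD (PySem.List.pyGetD arr (i + 1) []) j 0))) := by
  obtain ⟨m, hm⟩ := hr
  have hcast : (arr.length : Int) = 2 * (m : Int) := by omega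
  unfold vtransform
  rw [hcast, pyRange_two, List.foldl_map, List.map_map]
  have hdiv : (PySem.Int.floordiv (2 * (m : Int)) 2).toNat = m := floordiv_two_mul m
  rw [hdiv]
  have hstep : ∀ (a : List (List Int)) (t : Nat),
      (PySem.List.pyRange 0 c 1).foldl
        (fun ans j => appendAt ans (PySem.Int.floordiv (2 * (t : Int)) 2).toNat
          (min (PySem.List.pyGetD (PySem.List.pyGetD arr (2 * (t : Int)) []) j 0)
               (PySem.List.pyGetD (PySem.List.pyGetD arr (2 * (t : Int) + 1) []) j 0))) a =
      fillAt a t ((PySem.List.pyRange 0 c 1).map (fun j =>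
          min (PySem.List.pyGetD (PySem.List.pyGetD arr (2 * (t : Int)) []) j 0)
              (PySem.List.pyGetD (PySem.List.pyGetD arr (2 * (t : Int) + 1) []) j 0))) := by
    intro a t
    rw [foldl_appendAt, floordiv_two_mul]
  rw [PySem.List.foldl_congr_mem _ _
      (fun a (t : Nat) => fillAt a t ((PySem.List.pyRange 0 c 1).map (fun j =>
          min (PySem.List.pyGetD (PySem.List.pyGetD arr (2 * (t : Int)) []) j 0)
              (PySem.List.pyGetD (PySem.List.pyGetD arr (2 * (t : Int) + 1) []) j 0)))) _
      (fun a t _ => hstep a t)]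
  exact fold_fill_range m _

lemma pyGetD_zero_headD (arr : List (List Int)) :
    PySem.List.pyGetD arr 0 [] = arr.headD [] := by
  cases arr <;> simp [PySem.List.pyGetD_zero]

lemma solGo_eq (n : Nat) :
    ∀ (arr : List (List Int)), okDim arr.length (arr.headD []).length n = true →
      solGo arr n = solAltGo arr n := by
  induction n with
  | zero => intro arr _; rfl
  | succ n ih =>
    intro arr hinv
    simp only [solGo, solAltGo]
    rw [pyGetD_zero_headD]
    by_cases hge : (arr.headD []).length ≥ arr.length
    · have hif : ((arr.headD []).length : Int) ≥ (arr.length : Int) := by exact_mod_cast hge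
      rw [if_pos hif, if_pos hif, htransform_eq arr _]
      rw [okDim, if_pos hge, Bool.and_eq_true, decide_eq_true_eq] at hinv
      obtain ⟨h2c, hrec⟩ := hinv
      apply ih
      cases arr with
      | nil => simpa using hrec
      | cons a as =>
        obtain ⟨m, hm⟩ := h2c
        simp only [List.headD_cons] at hm hrec
        have hcast : (a.length : Int) = 2 * (m : Int) := by omega
        simp only [List.map_cons, List.headD_cons, List.length_map, List.length_cons]
        rw [hcast, length_pyRange_two]
        have hm2 : a.length / 2 = m := by omega
        rw [hm2] at hrec
        simpa using hrec
    · have hif : ¬ ((arr.headD []).length : Int) ≥ (arr.length : Int) := by exact_mod_cast hge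
      rw [if_neg hif, if_neg hif]
      rw [okDim, if_neg hge, Bool.and_eq_true, decide_eq_true_eq] at hinv
      obtain ⟨h2r, hrec⟩ := hinv
      rw [vtransform_eq arr _ h2r]
      obtain ⟨m, hm⟩ := h2r
      have hmpos : 0 < m := by omega
      have hcast : (arr.length : Int) = 2 * (m : Int) := by omega
      apply ih
      rw [hcast, pyRange_two]
      obtain ⟨m', rfl⟩ : ∃ m', m = m' + 1 := ⟨m - 1, by omega⟩
      rw [List.range_succ_eq_map]
      simp only [List.map_cons, List.map_map, List.headD_cons, List.length_map,
        List.length_cons, List.length_range, PySem.List.length_pyRange_one]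
      have h0 : ((arr.headD []).length : Int) - 0 = ((arr.headD []).length : Int) := by ring
      rw [h0, Int.toNat_natCast]
      have hm' : arr.length / 2 = m' + 1 := by omega
      rw [hm'] at hrec
      exact hrec

-- ===== VERDICT (by name: the statement is the Claim_ definition above) =====
theorem solution_spec : Claim_equal_solution := by
  intro arr k _ hpre
  unfold Spec_solution solution solution_alt
  obtain ⟨hk, h⟩ := hpre
  rcases h with h0 | ⟨_, _, hok⟩
  · subst h0; rfl
  · exact solGo_eq k.toNat arr hok
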